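-- pv_equiv track=rewrite | github.com/kamilsajdak96/Kompresja_danych_back | myapp/testCompression/compression.py | unapply_chromaticity_mask
-- ===== SOURCE A (Python) =====
-- def unapply_chromaticity_mask(input, width, height) -> list:
--     output = []
--
--     tmp_row = []
--     index = 0
--     row_counter = 0
--     pixels_in_row = int(width/3)
--     if width % 3 > 0:
--         pixels_in_row = pixels_in_row + 1
--
--     for i in range(len(input)):
--         if index < pixels_in_row:
--             tmp_row.append(input[i])
--             index = index + 1
--
--             if index == pixels_in_row:
--                 index = 0
--                 for col in range(3):
--                     if row_counter < height:
--                         index_counter = 0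
--                         for j in range(len(tmp_row)):
--                             for k in range(3):
--                                 if index_counter < width:
--                                     output.append(tmp_row[j])
--                                 index_counter = index_counter + 1
--                         row_counter = row_counter + 1
--                 if i + 1 != len(input):
--                     tmp_row = []
--     if row_counter != height:
--         for j in range(len(tmp_row)):
--             for k in range(3):
--                 output.append(tmp_row[j])
--     return output
-- ===== SOURCE B (Python) =====
-- def unapply_chromaticity_mask(input, width, height) -> list:
--     pixels_in_row = width // 3 + (1 if width % 3 else 0)
--     chunks = [input[i:i + pixels_in_row] for i in range(0, len(input), pixels_in_row)]
--     output = []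
--     rows = 0
--     for chunk in chunks:
--         if len(chunk) == pixels_in_row:
--             row = [q for q in chunk for _ in range(3)][:width]
--             reps = min(3, max(height - rows, 0))
--             output += row * reps
--             rows += reps
--     if rows != height:
--         tail = chunks[-1] if chunks else []
--         output += [q for q in tail for _ in range(3)]
--     return output
-- ===== Notes on version B (the rewrite author's own statement) =====
-- stated objective: simpler
-- what changed: B replaces A's stateful per-element scan (index/tmp_row/row_counter machine with a per-pixel width-counter in triple-nested loops) by slicing the input into chunks once and emitting min(3, height-rows) copies of each full chunk's width-truncated tripled row via list repetition, with the trailing row taken from the last chunk.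
-- outside the precondition, e.g. on unapply_chromaticity_mask([5], -1, 4): A returns [5, 5, 5], B raises ValueError; on unapply_chromaticity_mask([1, 2], 0, 2): A returns [], B raises ValueError
import Mathlib
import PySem

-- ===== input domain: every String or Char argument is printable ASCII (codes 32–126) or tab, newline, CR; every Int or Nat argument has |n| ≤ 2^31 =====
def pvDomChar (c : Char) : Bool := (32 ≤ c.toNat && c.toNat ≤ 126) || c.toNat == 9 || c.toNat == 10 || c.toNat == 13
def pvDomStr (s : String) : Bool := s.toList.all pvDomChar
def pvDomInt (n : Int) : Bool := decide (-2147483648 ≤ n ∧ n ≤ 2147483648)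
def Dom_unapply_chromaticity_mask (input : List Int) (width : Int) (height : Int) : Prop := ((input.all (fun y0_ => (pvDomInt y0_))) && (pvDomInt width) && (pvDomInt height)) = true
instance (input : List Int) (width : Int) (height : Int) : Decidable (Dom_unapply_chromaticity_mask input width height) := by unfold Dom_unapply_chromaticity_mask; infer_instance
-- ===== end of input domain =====

-- B replaces A's stateful per-element index/tmp_row/row_counter machine by chunking the
-- input once with slices and emitting per full chunk up to 3 copies of its tripled,
-- width-truncated row (objective: simpler; same asymptotic cost).


-- ===== PORT A =====
-- the k-loop: `for k in range(3): if index_counter < width: output.append(tmp_row[j]); index_counter += 1`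
def uacmA_k (width tj : Int) (s : List Int × Int) : List Int × Int :=
  (List.range 3).foldl (fun s _ => ((if s.2 < width then s.1 ++ [tj] else s.1), s.2 + 1)) s

-- the col-loop body: 3 passes, each appending one width-clamped row while row_counter < height
def uacmA_cols (width height : Int) (tmp : List Int) (s : List Int × Int) : List Int × Int :=
  (List.range 3).foldl (fun s _ =>
    if s.2 < height then
      ((tmp.foldl (fun t tj => uacmA_k width tj t) (s.1, (0 : Int))).1, s.2 + 1)
    else s) s

-- the body of `for i in range(len(input))`; state = (output, tmp_row, index, row_counter)
def uacmA_step (input : List Int) (width height pir : Int)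
    (st : List Int × List Int × Int × Int) (ix : Int × Int) : List Int × List Int × Int × Int :=
  if st.2.2.1 < pir then
    let t := st.2.1 ++ [ix.2]
    let idx := st.2.2.1 + 1
    if idx = pir then
      let orc := uacmA_cols width height t (st.1, st.2.2.2)
      (orc.1, (if ix.1 + 1 ≠ (input.length : Int) then [] else t), 0, orc.2)
    else (st.1, t, idx, st.2.2.2)
  else st

def unapply_chromaticity_mask (input : List Int) (width : Int) (height : Int) : List Int :=
  -- int(width/3): exact as truncating division for |width| ≤ 2^31 (the float quotient never rounds across an integer)
  let pir0 : Int := Int.tdiv width 3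
  let pir : Int := if PySem.Int.mod width 3 > 0 then pir0 + 1 else pir0
  let st := (PySem.List.enumerate input).foldl (uacmA_step input width height pir) ([], [], 0, 0)
  if st.2.2.2 ≠ height then
    st.2.1.foldl (fun o tj => (List.range 3).foldl (fun o _ => o ++ [tj]) o) st.1
  else st.1

-- ===== PORT B =====
-- `[q for q in c for _ in range(3)]`
def uacmB_triple (c : List Int) : List Int := c.flatMap (fun q => [q, q, q])

def unapply_chromaticity_mask_alt (input : List Int) (width : Int) (height : Int) : List Int :=
  let pir : Int := PySem.Int.floordiv width 3 + (if PySem.Int.mod width 3 ≠ 0 then 1 else 0)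
  let chunks := (PySem.List.pyRange 0 (input.length : Int) pir).map
      (fun i => PySem.List.slice input (some i) (some (i + pir)))
  let st := chunks.foldl (fun (st : List Int × Int) c =>
    if (c.length : Int) = pir then
      let row := PySem.List.slice (uacmB_triple c) none (some width)
      let reps := min 3 (max (height - st.2) 0)
      (st.1 ++ (List.replicate reps.toNat row).flatten, st.2 + reps)
    else st) ([], 0)
  if st.2 ≠ height then st.1 ++ uacmB_triple (chunks.getLast?.getD []) else st.1

-- ===== PRECONDITION & SPEC =====
-- Pre_ excludes exactly the widths -2, -1 and 0, where A's truncated chunk size yields accidental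
-- values ([] or a stray tripled trailing row) and B's natural chunking raises ValueError (its
-- range step is 0); on every other width, including width ≤ -3, A and B agree.
def Pre_unapply_chromaticity_mask (input : List Int) (width : Int) (height : Int) : Prop :=
  1 ≤ width ∨ width ≤ -3
instance (input : List Int) (width : Int) (height : Int) : Decidable (Pre_unapply_chromaticity_mask input width height) := by unfold Pre_unapply_chromaticity_mask; infer_instance

def pvWitness_unapply_chromaticity_mask : List Int × Int × Int := ([1, 2, 3], 4, 2)

def Spec_unapply_chromaticity_mask (input : List Int) (width : Int) (height : Int) (out : List Int) : Prop := out = unapply_chromaticity_mask_alt input width height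
instance (input : List Int) (width : Int) (height : Int) (out : List Int) : Decidable (Spec_unapply_chromaticity_mask input width height out) := by unfold Spec_unapply_chromaticity_mask; infer_instance

-- ===== CLAIM (what is proved, stated in full; the proofs are below) =====
def Claim_equal_unapply_chromaticity_mask : Prop := ∀ (input : List Int) (width : Int) (height : Int), Dom_unapply_chromaticity_mask input width height → Pre_unapply_chromaticity_mask input width height → Spec_unapply_chromaticity_mask input width height (unapply_chromaticity_mask input width height)

-- ===== LEMMAS AND PROOFS =====

-- the width-clamped tripled row a full chunk contributes
def pvRow (width : Int) (c : List Int) : List Int := (uacmB_triple c).take width.toNat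

-- reference recursion both ports are reduced to: process one p-chunk per step,
-- keeping the last chunk for the trailing (unclamped, single) row
def pvRefGo (width height : Int) (p : Nat) (l o : List Int) (rc : Int) : List Int :=
  if h : 0 < p ∧ p ≤ l.length then
    let reps := min 3 (max (height - rc) 0)
    let o' := o ++ (List.replicate reps.toNat (pvRow width (l.take p))).flatten
    let rc' := rc + reps
    if l.length = p then (if rc' ≠ height then o' ++ uacmB_triple l else o')
    else pvRefGo width height p (l.drop p) o' rc'
  else (if rc ≠ height then o ++ uacmB_triple l else o)
termination_by l.length
decreasing_by simp; omega

theorem uacmA_k_char (w x : Int) (o : List Int) (ic : Int) :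
    uacmA_k w x (o, ic) = (o ++ [x, x, x].take (w - ic).toNat, ic + 3) := by
  have hr : List.range 3 = [0, 1, 2] := rfl
  unfold uacmA_k
  rw [hr]
  simp only [List.foldl]
  by_cases h0 : ic < w
  · by_cases h1 : ic + 1 < w
    · by_cases h2 : ic + 2 < w
      · have ht : [x, x, x].take (w - ic).toNat = [x, x, x] :=
          List.take_of_length_le (by simp; omega)
        simp [h0, h1, h2, ht]
        omega
      · have ht : (w - ic).toNat = 2 := by omega
        simp [h0, h1, h2, ht]
        omega
    · have h2 : ¬ ic + 2 < w := by omega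
      have ht : (w - ic).toNat = 1 := by omega
      simp [h0, h1, h2, ht]
      omega
  · have h1 : ¬ ic + 1 < w := by omega
    have h2 : ¬ ic + 2 < w := by omega
    have ht : (w - ic).toNat = 0 := by omega
    simp [h0, h1, h2, ht]
    omega

theorem row_char (w : Int) (tmp : List Int) : ∀ (o : List Int) (ic : Int),
    tmp.foldl (fun t tj => uacmA_k w tj t) (o, ic)
      = (o ++ (uacmB_triple tmp).take (w - ic).toNat, ic + 3 * tmp.length) := by
  induction tmp with
  | nil => intro o ic; simp [uacmB_triple]
  | cons x t ih =>
      intro o ic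
      have htr : uacmB_triple (x :: t) = [x, x, x] ++ uacmB_triple t := by
        simp [uacmB_triple]
      have hnat : (w - (ic + 3)).toNat = (w - ic).toNat - 3 := by omega
      simp only [List.foldl, uacmA_k_char, ih, htr, List.take_append, hnat, Prod.mk.injEq]
      constructor
      · rw [List.append_assoc]
        congr 2
      · simp only [List.length_cons]; push_cast; ring

theorem cols_char (w h : Int) (tmp o : List Int) (rc : Int) :
    uacmA_cols w h tmp (o, rc)
      = (o ++ (List.replicate (min 3 (max (h - rc) 0)).toNat (pvRow w tmp)).flatten,
         rc + min 3 (max (h - rc) 0)) := by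
  have hr : List.range 3 = [0, 1, 2] := rfl
  have hrow : ∀ (o : List Int), tmp.foldl (fun t tj => uacmA_k w tj t) (o, (0 : Int))
      = (o ++ pvRow w tmp, (3 * tmp.length : Int)) := by
    intro o
    have := row_char w tmp o 0
    simpa [pvRow] using this
  unfold uacmA_cols
  rw [hr]
  simp only [List.foldl]
  by_cases h0 : rc < h
  · by_cases h1 : rc + 1 < h
    · by_cases h2 : rc + 1 + 1 < h
      · have hm : (min 3 (max (h - rc) 0)).toNat = 3 := by omega
        have hm' : min 3 (max (h - rc) 0) = 3 := by omega
        simp [h0, h1, h2, hrow, hm, hm', List.replicate, List.append_assoc]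
        omega
      · have hm : (min 3 (max (h - rc) 0)).toNat = 2 := by omega
        have hm' : min 3 (max (h - rc) 0) = 2 := by omega
        simp [h0, h1, h2, hrow, hm, hm', List.replicate, List.append_assoc]
        omega
    · have h2 : ¬ rc + 1 + 1 < h := by omega
      have hm : (min 3 (max (h - rc) 0)).toNat = 1 := by omega
      have hm' : min 3 (max (h - rc) 0) = 1 := by omega
      simp [h0, h1, h2, hrow, hm, hm', List.replicate]
  · have h1 : ¬ rc + 1 < h := by omega
    have hm : (min 3 (max (h - rc) 0)).toNat = 0 := by omega
    have hm' : min 3 (max (h - rc) 0) = 0 := by omega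
    simp [h0, h1, hm, hm']

theorem tail_char (t : List Int) : ∀ (o : List Int),
    t.foldl (fun o tj => (List.range 3).foldl (fun o _ => o ++ [tj]) o) o = o ++ uacmB_triple t := by
  induction t with
  | nil => intro o; simp [uacmB_triple]
  | cons x t ih =>
      intro o
      have hr : List.range 3 = [0, 1, 2] := rfl
      have htr : uacmB_triple (x :: t) = [x, x, x] ++ uacmB_triple t := by
        simp [uacmB_triple]
      simp only [List.foldl, hr, ih, htr]
      simp [List.append_assoc, uacmB_triple, List.flatMap]

theorem A_short (input : List Int) (w h pir : Int) (c : List Int) :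
    ∀ (s : Int) (o t : List Int) (rc : Int), (t.length : Int) + c.length < pir →
    List.foldl (uacmA_step input w h pir) (o, t, (t.length : Int), rc) (PySem.List.enumerate c s)
      = (o, t ++ c, (t.length : Int) + c.length, rc) := by
  induction c with
  | nil => intro s o t rc _; simp [PySem.List.enumerate_nil]
  | cons x c ih =>
      intro s o t rc hlt
      push_cast [List.length_cons] at hlt
      rw [PySem.List.enumerate_cons]
      simp only [List.foldl]
      have hstep : uacmA_step input w h pir (o, t, (t.length : Int), rc) (s, x)
          = (o, t ++ [x], (t.length : Int) + 1, rc) := by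
        unfold uacmA_step
        have h1 : (t.length : Int) < pir := by omega
        have h2 : ¬ ((t.length : Int) + 1 = pir) := by omega
        simp [h1, h2]
      rw [hstep]
      have hlen : ((t ++ [x]).length : Int) = (t.length : Int) + 1 := by simp
      have hrec := ih (s + 1) o (t ++ [x]) rc (by rw [hlen]; omega)
      rw [hlen] at hrec
      rw [hrec]
      have hl : t ++ [x] ++ c = t ++ x :: c := by simp
      have harith : (t.length : Int) + 1 + c.length = t.length + ((x :: c).length : Int) := by
        push_cast [List.length_cons]; ring
      rw [hl, harith]

theorem A_consume (input : List Int) (w h pir : Int) (c : List Int) :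
    ∀ (l : List Int) (s : Int) (o t : List Int) (rc : Int), c ≠ [] →
    (t.length : Int) + c.length = pir →
    List.foldl (uacmA_step input w h pir) (o, t, (t.length : Int), rc)
        (PySem.List.enumerate (c ++ l) s)
      = (fun orc => List.foldl (uacmA_step input w h pir)
            (orc.1, (if s + c.length ≠ (input.length : Int) then [] else t ++ c), 0, orc.2)
            (PySem.List.enumerate l (s + c.length)))
          (uacmA_cols w h (t ++ c) (o, rc)) := by
  induction c with
  | nil => intro l s o t rc hne _; exact absurd rfl hne
  | cons x c ih =>
      intro l s o t rc _ hlen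
      push_cast [List.length_cons] at hlen
      rw [List.cons_append, PySem.List.enumerate_cons]
      simp only [List.foldl]
      by_cases hc : c = []
      · subst hc
        simp only [List.length_nil] at hlen
        have hstep : uacmA_step input w h pir (o, t, (t.length : Int), rc) (s, x)
            = ((uacmA_cols w h (t ++ [x]) (o, rc)).1,
               (if s + 1 ≠ (input.length : Int) then [] else t ++ [x]), 0,
               (uacmA_cols w h (t ++ [x]) (o, rc)).2) := by
          unfold uacmA_step
          have h1 : (t.length : Int) < pir := by omega
          have h2 : (t.length : Int) + 1 = pir := by omega
          simp [h1, h2]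
        rw [hstep]
        simp
      · have hcl : 1 ≤ c.length := by
          cases c with
          | nil => exact absurd rfl hc
          | cons _ _ => simp
        have hstep : uacmA_step input w h pir (o, t, (t.length : Int), rc) (s, x)
            = (o, t ++ [x], (t.length : Int) + 1, rc) := by
          unfold uacmA_step
          have h1 : (t.length : Int) < pir := by omega
          have h2 : ¬ ((t.length : Int) + 1 = pir) := by omega
          simp [h1, h2]
        rw [hstep]
        have hlen' : ((t ++ [x]).length : Int) = (t.length : Int) + 1 := by simp
        have hrec := ih l (s + 1) o (t ++ [x]) rc hc (by rw [hlen']; omega)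
        rw [hlen'] at hrec
        rw [hrec]
        have hassoc : (t ++ [x]) ++ c = t ++ (x :: c) := by simp
        have hs : s + 1 + (c.length : Int) = s + ((x :: c).length : Int) := by
          push_cast [List.length_cons]; ring
        rw [hassoc, hs]

-- the final `if row_counter != height` step applied to a fold state
def pvPost (h : Int) (st : List Int × List Int × Int × Int) : List Int :=
  if st.2.2.2 ≠ h then
    st.2.1.foldl (fun o tj => (List.range 3).foldl (fun o _ => o ++ [tj]) o) st.1
  else st.1

theorem A_go (input : List Int) (w h : Int) (p : Nat) (hp : 0 < p) :
    ∀ (l : List Int) (s : Int) (o : List Int) (rc : Int), s + l.length = (input.length : Int) →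
    pvPost h (List.foldl (uacmA_step input w h (p : Int)) (o, [], 0, rc) (PySem.List.enumerate l s))
      = pvRefGo w h p l o rc := by
  suffices H : ∀ (n : Nat) (l : List Int) (s : Int) (o : List Int) (rc : Int), l.length = n →
      s + l.length = (input.length : Int) →
      pvPost h (List.foldl (uacmA_step input w h (p : Int)) (o, [], 0, rc)
        (PySem.List.enumerate l s)) = pvRefGo w h p l o rc by
    intro l s o rc hs
    exact H l.length l s o rc rfl hs
  have hpost : ∀ (oo l : List Int) (ii rr : Int),
      pvPost h (oo, l, ii, rr) = (if rr ≠ h then oo ++ uacmB_triple l else oo) := by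
    intro oo l ii rr
    unfold pvPost
    split_ifs with hfin
    · exact tail_char l oo
    · rfl
  intro n
  induction n using Nat.strong_induction_on with
  | _ n ih =>
    intro l s o rc hn hs
    by_cases hlep : p ≤ l.length
    · by_cases heq : l.length = p
      · -- the last chunk is full and ends exactly at the end of the input
        have hne : l ≠ [] := by
          intro h'; rw [h'] at heq; simp at heq; omega
        have hC := A_consume input w h (p : Int) l [] s o [] rc hne (by simp [heq])
        rw [List.append_nil] at hC
        have h0 : (([] : List Int).length : Int) = 0 := by simp
        rw [h0] at hC
        rw [hC]
        beta_reduce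
        have hcond : ¬ (s + (l.length : Int) ≠ (input.length : Int)) := by omega
        rw [if_neg hcond, List.nil_append, PySem.List.enumerate_nil, List.foldl_nil,
          cols_char, hpost]
        conv_rhs => rw [pvRefGo]
        rw [dif_pos (And.intro hp hlep), if_pos heq,
          List.take_of_length_le (by omega)]
      · -- a full chunk with more input after it
        have hgt : p < l.length := by omega
        have hsplit : l.take p ++ l.drop p = l := List.take_append_drop p l
        have hlt : (l.take p).length = p := by
          rw [List.length_take]; omega
        have hne : l.take p ≠ [] := by
          intro h'
          have := congrArg List.length h'
          rw [hlt] at this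
          simp at this; omega
        have hC := A_consume input w h (p : Int) (l.take p) (l.drop p) s o [] rc hne
          (by simp [hlt])
        rw [hsplit] at hC
        have h0 : (([] : List Int).length : Int) = 0 := by simp
        rw [h0] at hC
        rw [hC]
        beta_reduce
        rw [hlt, List.nil_append, cols_char]
        have hdrop : ((l.drop p).length : Int) = (l.length : Int) - p := by
          rw [List.length_drop]; omega
        have hcond : (s + (p : Int) ≠ (input.length : Int)) := by omega
        rw [if_pos hcond]
        have hrec := ih (l.length - p) (by omega) (l.drop p) (s + p)
          (o ++ (List.replicate (min 3 (max (h - rc) 0)).toNat (pvRow w (l.take p))).flatten)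
          (rc + min 3 (max (h - rc) 0))
          (by rw [List.length_drop])
          (by rw [hdrop]; omega)
        rw [hrec]
        conv_rhs => rw [pvRefGo]
        rw [dif_pos (And.intro hp hlep), if_neg heq]
    · -- a short (possibly empty) trailing piece
      have hS := A_short input w h (p : Int) l s o [] rc (by simp; omega)
      have h0 : (([] : List Int).length : Int) = 0 := by simp
      rw [h0] at hS
      rw [hS, List.nil_append, hpost]
      conv_rhs => rw [pvRefGo]
      rw [dif_neg (by omega : ¬ (0 < p ∧ p ≤ l.length))]

-- B side
def pvChunks (p : Nat) : List Int → List (List Int)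
  | [] => []
  | x :: xs => List.take p (x :: xs) :: pvChunks p (List.drop (p - 1) xs)
termination_by l => l.length
decreasing_by simp

theorem pyRange_chunk_cons (p : Nat) (hp : 0 < p) (n : Int) (hn : 0 < n) :
    PySem.List.pyRange 0 n (p : Int)
      = 0 :: (PySem.List.pyRange 0 (n - p) (p : Int)).map (fun i => i + (p : Int)) := by
  have hp' : (0 : Int) < p := by exact_mod_cast hp
  rw [PySem.List.pyRange_of_pos _ _ hp', PySem.List.pyRange_of_pos _ _ hp']
  have hcnt : (if (0 : Int) < n then ((n - 0 + p - 1) / p).toNat else 0)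
      = (if (0 : Int) < n - p then ((n - p - 0 + p - 1) / p).toNat else 0) + 1 := by
    rw [if_pos hn]
    have e1 : n - 0 + p - 1 = (n - 1) + 1 * p := by ring
    rw [e1, Int.add_mul_ediv_right _ _ (by omega)]
    by_cases h2 : 0 < n - p
    · rw [if_pos h2]
      have e2 : n - p - 0 + p - 1 = (n - p - 1) + 1 * p := by ring
      rw [e2, Int.add_mul_ediv_right _ _ (by omega)]
      have e3 : n - 1 = (n - p - 1) + 1 * p := by ring
      rw [e3, Int.add_mul_ediv_right _ _ (by omega)]
      have hnn : 0 ≤ (n - p - 1) / p := Int.ediv_nonneg (by omega) (by omega)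
      omega
    · rw [if_neg h2]
      rw [Int.ediv_eq_zero_of_lt (by omega) (by omega)]
      simp
  rw [hcnt, List.range_succ_eq_map, List.map_cons, List.map_map, List.map_map]
  refine List.cons_eq_cons.mpr ⟨by simp, ?_⟩
  apply List.map_congr_left
  intro k _
  simp only [Function.comp_apply]
  push_cast
  ring

theorem slice_shift (l : List Int) (p : Nat) (i : Int) (hi : 0 ≤ i) :
    PySem.List.slice l (some (i + p)) (some (i + p + p))
      = PySem.List.slice (l.drop p) (some i) (some (i + p)) := by
  rw [PySem.List.slice_toNat l (a := i + (p : Int)) (b := i + (p : Int) + (p : Int))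
      (by omega) (by omega),
    PySem.List.slice_toNat (l.drop p) (a := i) (b := i + (p : Int)) hi (by omega),
    List.drop_drop]
  have e1 : (i + p + p).toNat - (i + p).toNat = (i + p).toNat - i.toNat := by omega
  have e2 : (i + p).toNat = p + i.toNat := by omega
  rw [e1, e2]

theorem chunks_eq (p : Nat) (hp : 0 < p) : ∀ (l : List Int),
    (PySem.List.pyRange 0 (l.length : Int) (p : Int)).map
        (fun i => PySem.List.slice l (some i) (some (i + (p : Int))))
      = pvChunks p l := by
  suffices H : ∀ (n : Nat) (l : List Int), l.length = n →
      (PySem.List.pyRange 0 (l.length : Int) (p : Int)).map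
          (fun i => PySem.List.slice l (some i) (some (i + (p : Int))))
        = pvChunks p l by
    intro l; exact H l.length l rfl
  intro n
  induction n using Nat.strong_induction_on with
  | _ n ih =>
    intro l hn
    cases l with
    | nil =>
        rw [PySem.List.pyRange_of_pos _ _ (by exact_mod_cast hp)]
        simp [pvChunks]
    | cons x xs =>
        have hlen : (0 : Int) < ((x :: xs).length : Int) := by simp
        rw [pyRange_chunk_cons p hp _ hlen, List.map_cons, List.map_map]
        have hdropcons : (x :: xs).drop p = xs.drop (p - 1) := by
          cases p with
          | zero => omega
          | succ q => simp
        have hhead : PySem.List.slice (x :: xs) (some 0) (some (0 + (p : Int)))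
            = (x :: xs).take p := by
          rw [PySem.List.slice_toNat (x :: xs) (a := (0 : Int)) (b := 0 + (p : Int))
            (by omega) (by omega)]
          simp
        have htail : ((PySem.List.pyRange 0 (((x :: xs).length : Int) - p) (p : Int)).map
              ((fun i => PySem.List.slice (x :: xs) (some i) (some (i + (p : Int))))
                ∘ (fun i => i + (p : Int))))
            = pvChunks p ((x :: xs).drop p) := by
          have hmem : ∀ i ∈ PySem.List.pyRange 0 (((x :: xs).length : Int) - p) (p : Int),
              ((fun i => PySem.List.slice (x :: xs) (some i) (some (i + (p : Int))))
                ∘ (fun i => i + (p : Int))) i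
                = (fun i => PySem.List.slice ((x :: xs).drop p) (some i) (some (i + (p : Int)))) i := by
            intro i hi
            have h0i : 0 ≤ i := by
              have := (PySem.List.mem_pyRange_iff_of_pos (by exact_mod_cast hp) i).mp hi
              omega
            simp only [Function.comp_apply]
            exact slice_shift (x :: xs) p i h0i
          rw [List.map_congr_left hmem]
          by_cases hle : (x :: xs).length ≤ p
          · have hd : (x :: xs).drop p = [] := by
              rw [List.drop_eq_nil_iff]
              omega
            have hr : PySem.List.pyRange 0 (((x :: xs).length : Int) - p) (p : Int) = [] := by
              rw [PySem.List.pyRange_of_pos _ _ (by exact_mod_cast hp)]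
              rw [if_neg (by omega)]
              simp
            rw [hr, hd]
            simp [pvChunks]
          · have hd : (((x :: xs).drop p).length : Int) = ((x :: xs).length : Int) - p := by
              rw [List.length_drop]
              omega
            rw [← hd]
            exact ih ((x :: xs).drop p).length (by rw [List.length_drop]; omega) _ rfl
        rw [hhead, htail]
        conv_rhs => rw [pvChunks]
        rw [hdropcons]

theorem B_go (w h : Int) (p : Nat) (hp : 0 < p) (hw : 0 ≤ w) : ∀ (l o : List Int) (rc : Int),
    (if ((pvChunks p l).foldl (fun (st : List Int × Int) c =>
          if (c.length : Int) = (p : Int) then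
            (st.1 ++ (List.replicate (min 3 (max (h - st.2) 0)).toNat
                (PySem.List.slice (uacmB_triple c) none (some w))).flatten,
             st.2 + min 3 (max (h - st.2) 0))
          else st) (o, rc)).2 ≠ h
     then ((pvChunks p l).foldl (fun (st : List Int × Int) c =>
          if (c.length : Int) = (p : Int) then
            (st.1 ++ (List.replicate (min 3 (max (h - st.2) 0)).toNat
                (PySem.List.slice (uacmB_triple c) none (some w))).flatten,
             st.2 + min 3 (max (h - st.2) 0))
          else st) (o, rc)).1 ++ uacmB_triple ((pvChunks p l).getLast?.getD [])
     else ((pvChunks p l).foldl (fun (st : List Int × Int) c =>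
          if (c.length : Int) = (p : Int) then
            (st.1 ++ (List.replicate (min 3 (max (h - st.2) 0)).toNat
                (PySem.List.slice (uacmB_triple c) none (some w))).flatten,
             st.2 + min 3 (max (h - st.2) 0))
          else st) (o, rc)).1)
      = pvRefGo w h p l o rc := by
  have hrow : ∀ (c : List Int), PySem.List.slice (uacmB_triple c) none (some w) = pvRow w c := by
    intro c
    rw [PySem.List.slice_to (uacmB_triple c) hw]
    rfl
  suffices H : ∀ (n : Nat) (l : List Int), l.length = n → ∀ (o : List Int) (rc : Int),
      (if ((pvChunks p l).foldl (fun (st : List Int × Int) c =>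
            if (c.length : Int) = (p : Int) then
              (st.1 ++ (List.replicate (min 3 (max (h - st.2) 0)).toNat
                  (PySem.List.slice (uacmB_triple c) none (some w))).flatten,
               st.2 + min 3 (max (h - st.2) 0))
            else st) (o, rc)).2 ≠ h
       then ((pvChunks p l).foldl (fun (st : List Int × Int) c =>
            if (c.length : Int) = (p : Int) then
              (st.1 ++ (List.replicate (min 3 (max (h - st.2) 0)).toNat
                  (PySem.List.slice (uacmB_triple c) none (some w))).flatten,
               st.2 + min 3 (max (h - st.2) 0))
            else st) (o, rc)).1 ++ uacmB_triple ((pvChunks p l).getLast?.getD [])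
       else ((pvChunks p l).foldl (fun (st : List Int × Int) c =>
            if (c.length : Int) = (p : Int) then
              (st.1 ++ (List.replicate (min 3 (max (h - st.2) 0)).toNat
                  (PySem.List.slice (uacmB_triple c) none (some w))).flatten,
               st.2 + min 3 (max (h - st.2) 0))
            else st) (o, rc)).1)
        = pvRefGo w h p l o rc by
    intro l o rc; exact H l.length l rfl o rc
  intro n
  induction n using Nat.strong_induction_on with
  | _ n ih =>
    intro l hn o rc
    cases l with
    | nil =>
        conv_rhs => rw [pvRefGo]
        rw [dif_neg (by rintro ⟨_, h2⟩; simp at h2; omega)]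
        simp [pvChunks]
    | cons x xs =>
        have hdropcons : xs.drop (p - 1) = (x :: xs).drop p := by
          cases p with
          | zero => omega
          | succ q => simp
        have hchunks : pvChunks p (x :: xs)
            = (x :: xs).take p :: pvChunks p ((x :: xs).drop p) := by
          conv_lhs => rw [pvChunks]
          rw [hdropcons]
        rw [hchunks]
        by_cases hle : (x :: xs).length ≤ p
        · have hdnil : (x :: xs).drop p = [] := by rw [List.drop_eq_nil_iff]; omega
          have htake : (x :: xs).take p = x :: xs := List.take_of_length_le hle
          rw [hdnil, htake]
          by_cases heq : (x :: xs).length = p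
          · -- single full chunk
            have hcond : (((x :: xs).length : Int)) = (p : Int) := by exact_mod_cast heq
            simp only [pvChunks, List.foldl_cons, List.foldl_nil, if_pos hcond, hrow]
            conv_rhs => rw [pvRefGo]
            rw [dif_pos (And.intro hp (le_of_eq heq.symm)), if_pos heq,
              List.take_of_length_le (by omega)]
            simp
          · -- single short chunk: skipped by the fold
            have hcond : ¬ (((x :: xs).length : Int)) = (p : Int) := by
              intro h'; exact heq (by exact_mod_cast h')
            simp only [pvChunks, List.foldl_cons, List.foldl_nil, if_neg hcond]
            conv_rhs => rw [pvRefGo]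
            rw [dif_neg (by omega)]
            simp
        · -- a full chunk followed by more chunks
          have hgt : p < (x :: xs).length := by omega
          have htlen : ((x :: xs).take p).length = p := by rw [List.length_take]; omega
          have hcond : ((((x :: xs).take p).length : Int)) = (p : Int) := by
            exact_mod_cast htlen
          obtain ⟨a, as, hd⟩ : ∃ a as, (x :: xs).drop p = a :: as := by
            have hne : (x :: xs).drop p ≠ [] := by
              intro hdd
              have h' := congrArg List.length hdd
              have hgt' : p < xs.length + 1 := by simpa using hgt
              simp only [List.length_drop, List.length_nil, List.length_cons] at h'
              omega
            cases hdd : (x :: xs).drop p with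
            | nil => exact absurd hdd hne
            | cons a as => exact ⟨a, as, rfl⟩
          have hcons2 : pvChunks p ((x :: xs).drop p)
              = (a :: as).take p :: pvChunks p ((a :: as).drop p) := by
            rw [hd]
            conv_lhs => rw [pvChunks]
            congr 1
            cases p with
            | zero => omega
            | succ q => simp
          rw [List.foldl_cons, if_pos hcond]
          have hlast : ((x :: xs).take p :: pvChunks p ((x :: xs).drop p)).getLast?
              = (pvChunks p ((x :: xs).drop p)).getLast? := by
            rw [hcons2]
            exact List.getLast?_cons_cons
          rw [hlast]
          have hrec := ih ((x :: xs).drop p).length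
            (by rw [List.length_drop]; omega) ((x :: xs).drop p) rfl
            (o ++ (List.replicate (min 3 (max (h - rc) 0)).toNat
              (PySem.List.slice (uacmB_triple ((x :: xs).take p)) none (some w))).flatten)
            (rc + min 3 (max (h - rc) 0))
          rw [hrec, hrow]
          conv_rhs => rw [pvRefGo]
          rw [dif_pos (And.intro hp (le_of_lt hgt)),
            if_neg (by omega : ¬ (x :: xs).length = p)]

theorem foldl_const {α β : Type} (f : β → α → β) (st : β) (h : ∀ x, f st x = st) :
    ∀ (L : List α), List.foldl f st L = st := by
  intro L
  induction L with
  | nil => rfl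
  | cons x L ih => rw [List.foldl_cons, h x, ih]

-- ===== VERDICT (by name: the statement is the Claim_ definition above) =====
theorem unapply_chromaticity_mask_spec : Claim_equal_unapply_chromaticity_mask := by
  unfold Claim_equal_unapply_chromaticity_mask
  intro input width height _ hpre
  unfold Pre_unapply_chromaticity_mask at hpre
  unfold Spec_unapply_chromaticity_mask
  have hm3 : PySem.Int.mod width 3 = width % 3 := PySem.Int.mod_eq_emod_of_pos (by norm_num)
  have hf3 : PySem.Int.floordiv width 3 = width / 3 :=
    PySem.Int.floordiv_eq_ediv_of_pos (by norm_num)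
  set pb : Int := PySem.Int.floordiv width 3 + (if PySem.Int.mod width 3 ≠ 0 then 1 else 0)
    with hpb
  rcases hpre with hpos | hneg
  · -- the natural domain: width ≥ 1
    have ht3 : Int.tdiv width 3 = width / 3 := by
      rw [Int.tdiv_eq_ediv]
      simp [show (0 : Int) ≤ width by omega]
    have hpb1 : 1 ≤ pb := by
      rw [hpb, hf3, hm3]
      split_ifs with hz <;> omega
    set p : Nat := pb.toNat with hpn
    have hcast : (p : Int) = pb := Int.toNat_of_nonneg (by omega)
    have hp : 0 < p := by omega
    have hApir : (if PySem.Int.mod width 3 > 0 then Int.tdiv width 3 + 1 else Int.tdiv width 3)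
        = (p : Int) := by
      rw [hcast, hpb, hm3, hf3, ht3]
      split_ifs with h1 h2 <;> omega
    have hA : unapply_chromaticity_mask input width height
        = pvPost height (List.foldl (uacmA_step input width height (p : Int)) ([], [], 0, 0)
            (PySem.List.enumerate input 0)) := by
      simp only [unapply_chromaticity_mask]
      rw [hApir]
      rfl
    rw [hA, A_go input width height p hp input 0 [] 0 (by simp)]
    rw [← B_go width height p hp (by omega) input [] 0]
    simp only [unapply_chromaticity_mask_alt]
    rw [← hpb, ← hcast, chunks_eq p hp input]
  · -- width ≤ -3: both programs produce no pixels at all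
    have hpirA_le : (if PySem.Int.mod width 3 > 0 then Int.tdiv width 3 + 1 else Int.tdiv width 3)
        ≤ 0 := by
      rw [hm3, Int.tdiv_eq_ediv]
      simp only [Int.dvd_iff_emod_eq_zero, Int.sign_eq_one_iff_pos.mpr
        (by norm_num : (0 : Int) < 3)]
      split_ifs <;> omega
    have hpbneg : pb ≤ -1 := by
      rw [hpb, hf3, hm3]
      split_ifs <;> omega
    have hBempty : PySem.List.pyRange 0 (input.length : Int) pb = [] := by
      unfold PySem.List.pyRange
      rw [if_neg (by omega : ¬ pb = 0), if_neg (by omega : ¬ (0 : Int) < pb),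
        if_neg (by omega : ¬ (input.length : Int) < 0)]
      simp
    have hstep : ∀ ix, uacmA_step input width height
        (if PySem.Int.mod width 3 > 0 then Int.tdiv width 3 + 1 else Int.tdiv width 3)
        ([], [], 0, 0) ix = ([], [], 0, 0) := by
      intro ix
      unfold uacmA_step
      rw [if_neg (by simpa using (by omega :
        ¬ (0 : Int) < (if PySem.Int.mod width 3 > 0 then Int.tdiv width 3 + 1
            else Int.tdiv width 3)))]
    simp only [unapply_chromaticity_mask, unapply_chromaticity_mask_alt]
    rw [foldl_const _ _ hstep (PySem.List.enumerate input 0)]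
    rw [← hpb, hBempty]
    simp [uacmB_triple]
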